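-- pv_equiv track=rewrite | github.com/rethinkdb/rethinkdb | scripts/build_handlebars_templates.py | split_by_script_tags
-- ===== SOURCE A (Python) =====
-- def split_by_script_tags(text):
--     pos = 0
--     parts = []
--     search_string = '<script'
--     while pos < len(text):
--         findres = text.find(search_string, pos + 1)
--         if findres == -1:
--             parts += [text[pos:]]
--             pos = len(text)
--         else:
--             parts += [text[pos:findres]]
--             pos = findres
--     return parts
-- ===== SOURCE B (Python) =====
-- def split_by_script_tags(text):
--     if not text:
--         return []
--     cuts = [i for i in range(1, len(text)) if text.startswith('<script', i)]
--     return [text[a:b] for a, b in zip([0] + cuts, cuts + [len(text)])]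
-- ===== Notes on version B (the rewrite author's own statement) =====
-- stated objective: simpler
-- what changed: Replaced A's stateful while loop that interleaves str.find calls with slicing by a two-phase version: one comprehension collects all script-tag boundary indexes (excluding index 0), then one comprehension slices between consecutive boundaries.
import Mathlib
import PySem

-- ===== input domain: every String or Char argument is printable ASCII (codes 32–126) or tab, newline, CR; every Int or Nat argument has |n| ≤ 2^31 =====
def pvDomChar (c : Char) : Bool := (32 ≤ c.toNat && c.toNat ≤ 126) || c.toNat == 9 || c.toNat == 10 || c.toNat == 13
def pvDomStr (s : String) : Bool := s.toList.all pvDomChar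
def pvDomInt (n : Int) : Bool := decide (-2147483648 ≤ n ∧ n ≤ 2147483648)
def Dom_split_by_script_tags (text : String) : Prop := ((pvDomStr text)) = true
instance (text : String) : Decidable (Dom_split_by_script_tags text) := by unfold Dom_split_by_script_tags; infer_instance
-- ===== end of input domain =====

-- B splits the same text in two phases (collect all '<script' boundary indexes > 0, then slice
-- between consecutive boundaries) instead of A's interleaved find-and-slice while loop; objective: simpler.

-- the literal '<script' both Pythons contain
def scriptTag : List Char := "<script".toList

-- ===== PORT A =====
-- A's while loop: pos / parts are the loop state; text.find(search_string, pos + 1) is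
-- PySem.Chars.findFrom; text[pos:] / text[pos:findres] are PySem.Chars.slice.
def loopA (cs : List Char) (pos : Nat) (parts : List String) : List String :=
  if h : pos < cs.length then
    let findres := PySem.Chars.findFrom cs scriptTag ((pos : Int) + 1) none
    if hf : findres = -1 then
      parts ++ [String.ofList (PySem.Chars.slice cs (some (pos : Int)) none)]
    else
      loopA cs findres.toNat
        (parts ++ [String.ofList (PySem.Chars.slice cs (some (pos : Int)) (some findres))])
  else parts
termination_by cs.length - pos
decreasing_by
  have hcast : ((pos : Int) + 1) = ((pos + 1 : Nat) : Int) := by push_cast; ring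
  have hspec := PySem.Chars.findFrom_natCast_spec cs scriptTag (pos + 1)
    (by omega) (by rw [← hcast]; exact hf)
  rw [← hcast] at hspec
  omega

def split_by_script_tags (text : String) : List String :=
  loopA text.toList 0 []

-- ===== PORT B =====
-- B's list comprehension over range(1, len(text)); text.startswith('<script', i) for 0 ≤ i ≤ len
-- is exactly PySem.Chars.startswith on cs.drop i (ported by hand: PySem has no start argument).
def split_by_script_tags_alt (text : String) : List String :=
  let cs := text.toList
  if cs.isEmpty then []
  else
    let cuts := (PySem.List.pyRange 1 (cs.length : Int) 1).filter
      (fun i => PySem.Chars.startswith (cs.drop i.toNat) scriptTag)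
    (((0 : Int) :: cuts).zip (cuts ++ [(cs.length : Int)])).map
      (fun p => String.ofList (PySem.Chars.slice cs (some p.1) (some p.2)))

-- ===== PRECONDITION & SPEC =====
def Spec_split_by_script_tags (text : String) (out : List String) : Prop := out = split_by_script_tags_alt text
instance (text : String) (out : List String) : Decidable (Spec_split_by_script_tags text out) := by unfold Spec_split_by_script_tags; infer_instance

-- ===== CLAIM (what is proved, stated in full; the proofs are below) =====
def Claim_equal_split_by_script_tags : Prop := ∀ (text : String), Dom_split_by_script_tags text → Spec_split_by_script_tags text (split_by_script_tags text)

-- ===== LEMMAS AND PROOFS =====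

-- the boundary indexes strictly greater than p
def cutsGt (cs : List Char) (p : Nat) : List Int :=
  (PySem.List.pyRange ((p : Int) + 1) (cs.length : Int) 1).filter
    (fun i => PySem.Chars.startswith (cs.drop i.toNat) scriptTag)

-- the segments of cs delimited by the given cut list, starting at `start`
def segs (cs : List Char) (start : Int) : List Int → List String
  | [] => [String.ofList (PySem.Chars.slice cs (some start) (some (cs.length : Int)))]
  | c :: rest => String.ofList (PySem.Chars.slice cs (some start) (some c)) :: segs cs c rest

lemma zip_segs (cs : List Char) (cuts : List Int) : ∀ start : Int,
    ((start :: cuts).zip (cuts ++ [(cs.length : Int)])).map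
      (fun p => String.ofList (PySem.Chars.slice cs (some p.1) (some p.2)))
      = segs cs start cuts := by
  induction cuts with
  | nil => intro start; simp [segs]
  | cons c rest ih => intro start; simp only [List.cons_append, List.zip_cons_cons, List.map_cons, ih c, segs]

lemma slice_none_eq (cs : List Char) (pos : Nat) (hp : pos ≤ cs.length) :
    PySem.Chars.slice cs (some (pos : Int)) none
      = PySem.Chars.slice cs (some (pos : Int)) (some (cs.length : Int)) := by
  rw [PySem.Chars.slice_eq_listSlice, PySem.Chars.slice_eq_listSlice,
      PySem.List.slice_some_none, PySem.List.slice_toNat cs (by positivity) (by positivity),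
      PySem.List.clampIdx_natCast, List.take_of_length_le (by simp)]
  congr 1
  omega

lemma tag_prefix_drop_infix (cs : List Char) (k m : Nat) (hkm : k ≤ m)
    (h : scriptTag <+: cs.drop m) : scriptTag <:+: cs.drop k := by
  have : cs.drop m = (cs.drop k).drop (m - k) := by rw [List.drop_drop]; congr 1; omega
  rw [this] at h
  exact h.isInfix.trans (List.drop_suffix _ _).isInfix

lemma loopA_eq (cs : List Char) : ∀ n pos parts, cs.length - pos = n → pos < cs.length →
    loopA cs pos parts = parts ++ segs cs (pos : Int) (cutsGt cs pos) := by
  intro n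
  induction n using Nat.strong_induction_on with
  | _ n ih =>
    intro pos parts hn hl
    have hcast : ((pos : Int) + 1) = ((pos + 1 : Nat) : Int) := by push_cast; ring
    rw [loopA, dif_pos hl]
    by_cases hf : PySem.Chars.findFrom cs scriptTag ((pos : Int) + 1) none = -1
    · rw [dif_pos hf]
      have hnone : ¬ scriptTag <:+: cs.drop (pos + 1) := by
        rw [← PySem.Chars.findFrom_natCast_eq_neg_one_iff cs scriptTag (pos + 1) (by omega), ← hcast]
        exact hf
      have hcuts : cutsGt cs pos = [] := by
        rw [cutsGt, List.filter_eq_nil_iff]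
        intro i hi
        rw [hcast, PySem.List.mem_pyRange_one] at hi
        intro hP
        exact hnone (tag_prefix_drop_infix cs (pos + 1) i.toNat (by omega)
          ((PySem.Chars.startswith_iff _ _).mp hP))
      rw [hcuts, segs, slice_none_eq cs pos (by omega)]
    · rw [dif_neg hf]
      have hspec := PySem.Chars.findFrom_natCast_spec cs scriptTag (pos + 1) (by omega)
        (by rw [← hcast]; exact hf)
      rw [← hcast] at hspec
      obtain ⟨h1, h2, h3⟩ := hspec
      set f := PySem.Chars.findFrom cs scriptTag ((pos : Int) + 1) none with hfdef
      have hf0 : (0 : Int) ≤ f := by omega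
      have hfn : f = ((f.toNat : Nat) : Int) := by omega
      have hflt : f.toNat < cs.length := by
        have := h2.length_le
        have hlen : scriptTag.length = 7 := by decide
        rw [List.length_drop, hlen] at this
        omega
      have hcuts : cutsGt cs pos = f :: cutsGt cs f.toNat := by
        rw [cutsGt, hcast,
          PySem.List.pyRange_one_append ((pos + 1 : Nat) : Int) f (cs.length : Int)
            (by omega) (by omega),
          List.filter_append]
        have h₁ : (PySem.List.pyRange ((pos + 1 : Nat) : Int) f 1).filter
            (fun i => PySem.Chars.startswith (cs.drop i.toNat) scriptTag) = [] := by
          rw [List.filter_eq_nil_iff]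
          intro i hi
          rw [PySem.List.mem_pyRange_one] at hi
          intro hP
          exact h3 i.toNat (by omega) (by omega) ((PySem.Chars.startswith_iff _ _).mp hP)
        rw [h₁, List.nil_append,
          PySem.List.pyRange_one_cons (by omega),
          List.filter_cons_of_pos (by exact (PySem.Chars.startswith_iff _ _).mpr h2),
          cutsGt, show ((f.toNat : Nat) : Int) + 1 = f + 1 from by omega]
      rw [ih (cs.length - f.toNat) (by omega) f.toNat _ rfl hflt, hcuts, segs]
      rw [List.append_assoc]
      congr 2
      rw [← hfn]
      simp

-- ===== VERDICT (by name: the statement is the Claim_ definition above) =====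
theorem split_by_script_tags_spec : Claim_equal_split_by_script_tags := by
  intro text _
  unfold Spec_split_by_script_tags split_by_script_tags split_by_script_tags_alt
  by_cases he : text.toList.isEmpty
  · rw [if_pos he, loopA, dif_neg (by simp at he; simp [he])]
  · rw [if_neg he,
      loopA_eq text.toList (text.toList.length - 0) 0 [] rfl
        (by simp only [List.isEmpty_iff] at he; exact List.length_pos_of_ne_nil he),
      zip_segs]
    simp only [List.nil_append, Nat.cast_zero, cutsGt, zero_add]
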